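-- pv_equiv track=rewrite | github.com/RoRobinh98/comp90054-yinsh-game | agents/myteam/player_astar.py | HeuristicValue
-- ===== SOURCE A (Python) =====
-- def HeuristicValue(list, id):
--     if 5 in list:
--         return 999
--     if (id == 0 and 3 in list) or (id == 1 and 1 in list):
--         return 999
--
--     simplify_list = [list[0]]
--     hValue = 0
--     for i in range(1, 5):
--         if list[i] == list[i - 1] and (list[i - 1] == 2 or list[i - 1] == 4):
--             continue
--         simplify_list.append(list[i])
--
--     for i in simplify_list:
--         if i == (id * 2 + 1) or i == 0:
--             hValue += 1
--
--     if 0 in list: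
--         hValue += 1
--
--     if id == 0:
--         hValue += max(simplify_list.count(4) - simplify_list.count(1), 0)
--
--     if id == 1:
--         hValue += max(simplify_list.count(2) - simplify_list.count(3), 0)
--
--     return hValue
-- ===== SOURCE B (Python) =====
-- def _rle_aux(x, k, ys):
--     # recursive run-length encoding: collect the run of x, then recurse
--     if not ys:
--         return [(x, k)]
--     if ys[0] == x:
--         return _rle_aux(x, k + 1, ys[1:])
--     return [(x, k)] + _rle_aux(ys[0], 1, ys[1:])
--
--
-- def _rle(xs):
--     if not xs:
--         return []
--     return _rle_aux(xs[0], 1, xs[1:])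
--
--
-- def HeuristicValue(list, id):
--     if 5 in list:
--         return 999
--     if (id == 0 and 3 in list) or (id == 1 and 1 in list):
--         return 999
--
--     # Run-length encode the 5-element prefix, then score from a value -> kept-count
--     # table: a run of v contributes 1 kept copy if v is 2 or 4, else its full length.
--     state = [list[i] for i in range(5)]
--     cnt = {}
--     for v, k in _rle(state):
--         cnt[v] = cnt.get(v, 0) + (1 if v == 2 or v == 4 else k)
--
--     h = cnt.get(id * 2 + 1, 0) + cnt.get(0, 0)
--     if 0 in list:
--         h += 1
--     if id == 0:
--         h += max(cnt.get(4, 0) - cnt.get(1, 0), 0)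
--     if id == 1:
--         h += max(cnt.get(2, 0) - cnt.get(3, 0), 0)
--     return h
-- ===== Notes on version B (the rewrite author's own statement) =====
-- stated objective: alternative
-- what changed: Replaces A's skip-previous filtering loop plus a second membership-scoring loop and four .count scans with a recursive run-length encoding of the 5-element state and a value->kept-count dictionary (a run of v contributes 1 if v is 2 or 4, else its length), from which the score is assembled.
import Mathlib
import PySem

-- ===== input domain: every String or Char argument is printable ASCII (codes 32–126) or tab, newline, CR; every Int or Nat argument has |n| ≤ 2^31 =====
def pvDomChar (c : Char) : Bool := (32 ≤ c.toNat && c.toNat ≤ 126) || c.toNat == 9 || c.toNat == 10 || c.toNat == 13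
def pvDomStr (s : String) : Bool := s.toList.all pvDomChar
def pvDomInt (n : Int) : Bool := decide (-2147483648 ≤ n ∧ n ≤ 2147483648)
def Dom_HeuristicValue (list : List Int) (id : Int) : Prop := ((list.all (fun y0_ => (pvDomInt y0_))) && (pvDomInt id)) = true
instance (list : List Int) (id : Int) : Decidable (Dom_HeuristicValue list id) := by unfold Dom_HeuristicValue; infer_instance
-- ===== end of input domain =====

-- B replaces A's skip-previous filtering loop, second scoring loop and four .count scans by a
-- recursive run-length encoding of the 5-element prefix and a value -> kept-count dictionary
-- from which the score is assembled (objective: alternative decomposition, same cost).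

-- ===== PORT A =====
def HeuristicValue (list : List Int) (id : Int) : Int :=
  if (5 : Int) ∈ list then 999
  else if (id = 0 ∧ (3 : Int) ∈ list) ∨ (id = 1 ∧ (1 : Int) ∈ list) then 999
  else
    let simplify_list := (PySem.List.pyRange 1 5 1).foldl (fun acc i =>
      if PySem.List.pyGetD list i 0 = PySem.List.pyGetD list (i - 1) 0 ∧
         (PySem.List.pyGetD list (i - 1) 0 = 2 ∨ PySem.List.pyGetD list (i - 1) 0 = 4)
      then acc
      else acc ++ [PySem.List.pyGetD list i 0]) [PySem.List.pyGetD list 0 0]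
    let hValue : Int := simplify_list.foldl (fun h x => if x = id * 2 + 1 ∨ x = 0 then h + 1 else h) 0
    let hValue := if (0 : Int) ∈ list then hValue + 1 else hValue
    let hValue := if id = 0 then
        hValue + max ((PySem.List.count simplify_list 4 : Int) - (PySem.List.count simplify_list 1 : Int)) 0
      else hValue
    let hValue := if id = 1 then
        hValue + max ((PySem.List.count simplify_list 2 : Int) - (PySem.List.count simplify_list 3 : Int)) 0
      else hValue
    hValue

-- ===== PORT B =====
-- recursive run-length encoding (port of Source B's _rle_aux / _rle)
def rleAux (x : Int) (k : Int) : List Int → List (Int × Int)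
  | [] => [(x, k)]
  | y :: ys => if y = x then rleAux x (k + 1) ys else (x, k) :: rleAux y 1 ys

def rle : List Int → List (Int × Int)
  | [] => []
  | x :: xs => rleAux x 1 xs

def HeuristicValue_alt (list : List Int) (id : Int) : Int :=
  if (5 : Int) ∈ list then 999
  else if (id = 0 ∧ (3 : Int) ∈ list) ∨ (id = 1 ∧ (1 : Int) ∈ list) then 999
  else
    let state := (PySem.List.pyRange 0 5 1).map (fun i => PySem.List.pyGetD list i 0)
    let cnt := (rle state).foldl
      (fun d p => d.insert p.1 (d.getD p.1 0 + (if p.1 = 2 ∨ p.1 = 4 then 1 else p.2)))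
      (PySem.Dict.empty : PySem.Dict Int Int)
    let h := cnt.getD (id * 2 + 1) 0 + cnt.getD 0 0
    let h := if (0 : Int) ∈ list then h + 1 else h
    let h := if id = 0 then h + max (cnt.getD 4 0 - cnt.getD 1 0) 0 else h
    if id = 1 then h + max (cnt.getD 2 0 - cnt.getD 3 0) 0 else h

-- ===== PRECONDITION & SPEC =====
-- Pre_ admits exactly the inputs on which A returns: either an early 999 guard fires, or the
-- list has at least 5 elements; on all other inputs A raises IndexError.
def Pre_HeuristicValue (list : List Int) (id : Int) : Prop :=
  (5 : Int) ∈ list ∨ (id = 0 ∧ (3 : Int) ∈ list) ∨ (id = 1 ∧ (1 : Int) ∈ list) ∨ 5 ≤ list.length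
instance (list : List Int) (id : Int) : Decidable (Pre_HeuristicValue list id) := by
  unfold Pre_HeuristicValue; infer_instance
def pvWitness_HeuristicValue : List Int × Int := ([4, 4, 2, 0, 1], 0)

def Spec_HeuristicValue (list : List Int) (id : Int) (out : Int) : Prop := out = HeuristicValue_alt list id
instance (list : List Int) (id : Int) (out : Int) : Decidable (Spec_HeuristicValue list id out) := by unfold Spec_HeuristicValue; infer_instance

-- ===== CLAIM (what is proved, stated in full; the proofs are below) =====
def Claim_equal_HeuristicValue : Prop := ∀ (list : List Int) (id : Int), Dom_HeuristicValue list id → Pre_HeuristicValue list id → Spec_HeuristicValue list id (HeuristicValue list id)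

-- ===== LEMMAS AND PROOFS =====

def pvContrib (v : Int) : List (Int × Int) → Int
  | [] => 0
  | p :: rest => (if p.1 = v then (if p.1 = 2 ∨ p.1 = 4 then 1 else p.2) else 0) + pvContrib v rest

def pvFilterAdj (prev : Int) : List Int → List Int
  | [] => []
  | y :: ys => (if y = prev ∧ (prev = 2 ∨ prev = 4) then [] else [y]) ++ pvFilterAdj y ys

theorem dict_contrib (runs : List (Int × Int)) (d : PySem.Dict Int Int) (v : Int) :
    (runs.foldl (fun d p => d.insert p.1 (d.getD p.1 0 + (if p.1 = 2 ∨ p.1 = 4 then 1 else p.2))) d).getD v 0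
      = d.getD v 0 + pvContrib v runs := by
  induction runs generalizing d with
  | nil => simp [pvContrib]
  | cons p rest ih =>
    simp only [List.foldl_cons, ih, pvContrib, PySem.Dict.getD_insert]
    by_cases hv : v = p.1
    · simp [hv]; ring
    · have hv' : ¬ p.1 = v := fun h => hv h.symm
      simp [hv, hv']

theorem rle_contrib (ys : List Int) (x k v : Int) :
    pvContrib v (rleAux x k ys)
      = (if x = v then (if x = 2 ∨ x = 4 then 1 else k) else 0) + ((pvFilterAdj x ys).count v : Int) := by
  induction ys generalizing x k with
  | nil => simp [rleAux, pvContrib, pvFilterAdj]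
  | cons y ys ih =>
    by_cases hyx : y = x
    · subst hyx
      rw [show rleAux y k (y :: ys) = rleAux y (k + 1) ys from by simp [rleAux], ih,
        show pvFilterAdj y (y :: ys) = (if y = y ∧ (y = 2 ∨ y = 4) then [] else [y]) ++ pvFilterAdj y ys from rfl]
      by_cases hv : y = v
      · subst hv
        by_cases h24 : y = 2 ∨ y = 4 <;>
          simp [h24, List.count_append, List.count_cons] <;> push_cast <;> omega
      · have hv' : ¬ v = y := fun h => hv h.symm
        by_cases h24 : y = 2 ∨ y = 4 <;>
          simp [h24, hv, hv', List.count_append, List.count_cons] <;> push_cast <;> omega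
    · rw [show rleAux x k (y :: ys) = (x, k) :: rleAux y 1 ys from by simp [rleAux, hyx],
        show pvContrib v ((x, k) :: rleAux y 1 ys)
          = (if x = v then (if x = 2 ∨ x = 4 then 1 else k) else 0) + pvContrib v (rleAux y 1 ys) from rfl,
        ih,
        show pvFilterAdj x (y :: ys) = (if y = x ∧ (x = 2 ∨ x = 4) then [] else [y]) ++ pvFilterAdj y ys from rfl,
        if_neg (by tauto : ¬(y = x ∧ (x = 2 ∨ x = 4)))]
      by_cases hv : y = v
      · subst hv
        by_cases h24 : y = 2 ∨ y = 4 <;> by_cases hx : x = y <;>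
          simp [h24, hx, List.count_append, List.count_cons] <;> push_cast <;> omega
      · have hv' : ¬ v = y := fun h => hv h.symm
        by_cases hx : x = v <;>
          simp [hx, hv, hv', List.count_append, List.count_cons] <;> push_cast <;> omega

theorem rle_contrib_one (ys : List Int) (x v : Int) :
    pvContrib v (rleAux x 1 ys) = ((x :: pvFilterAdj x ys).count v : Int) := by
  rw [rle_contrib]
  by_cases hv : x = v <;> by_cases h24 : x = 2 ∨ x = 4 <;>
    simp [hv, h24, List.count_cons] <;> push_cast <;> omega

theorem count_or_foldl (p q : Int) (hpq : p ≠ q) (S : List Int) (h0 : Int) :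
    S.foldl (fun h x => if x = p ∨ x = q then h + 1 else h) h0 = h0 + (S.count p : Int) + (S.count q : Int) := by
  induction S generalizing h0 with
  | nil => simp
  | cons s S ih =>
    simp only [List.foldl_cons, ih, List.count_cons]
    by_cases hp : s = p <;> by_cases hq : s = q <;> simp [hp, hq] <;> push_cast <;> omega

theorem foldl_link (a b c d e : Int) (t : List Int) :
    ((PySem.List.pyRange 1 5 1).foldl (fun acc i =>
      if PySem.List.pyGetD (a::b::c::d::e::t) i 0 = PySem.List.pyGetD (a::b::c::d::e::t) (i - 1) 0 ∧
         (PySem.List.pyGetD (a::b::c::d::e::t) (i - 1) 0 = 2 ∨ PySem.List.pyGetD (a::b::c::d::e::t) (i - 1) 0 = 4)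
      then acc
      else acc ++ [PySem.List.pyGetD (a::b::c::d::e::t) i 0]) [PySem.List.pyGetD (a::b::c::d::e::t) 0 0])
      = a :: pvFilterAdj a [b, c, d, e] := by
  have hr : PySem.List.pyRange 1 5 1 = [1, 2, 3, 4] := by decide
  have g0 : PySem.List.pyGetD (a::b::c::d::e::t) 0 0 = a := by simp [pysem]
  have g1 : PySem.List.pyGetD (a::b::c::d::e::t) 1 0 = b := by simp [pysem]
  have g2 : PySem.List.pyGetD (a::b::c::d::e::t) 2 0 = c := by simp [pysem]
  have g3 : PySem.List.pyGetD (a::b::c::d::e::t) 3 0 = d := by simp [pysem]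
  have g4 : PySem.List.pyGetD (a::b::c::d::e::t) 4 0 = e := by simp [pysem]
  norm_num [hr, g0, g1, g2, g3, g4, List.foldl_cons, List.foldl_nil, pvFilterAdj]
  split_ifs <;> simp

theorem HeuristicValue_core (a b c d e : Int) (t : List Int) (id : Int)
    (h5 : ¬ (5 : Int) ∈ a :: b :: c :: d :: e :: t)
    (hg : ¬ ((id = 0 ∧ (3 : Int) ∈ a :: b :: c :: d :: e :: t) ∨ (id = 1 ∧ (1 : Int) ∈ a :: b :: c :: d :: e :: t))) :
    HeuristicValue (a :: b :: c :: d :: e :: t) id = HeuristicValue_alt (a :: b :: c :: d :: e :: t) id := by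
  have hs : (PySem.List.pyRange 0 5 1).map (fun i => PySem.List.pyGetD (a :: b :: c :: d :: e :: t) i 0)
      = [a, b, c, d, e] := by
    rw [show PySem.List.pyRange 0 5 1 = [0, 1, 2, 3, 4] from by decide]
    simp [pysem]
  simp only [HeuristicValue, HeuristicValue_alt, if_neg h5, if_neg hg, hs, rle]
  rw [foldl_link]
  rw [count_or_foldl (id * 2 + 1) 0 (by omega)]
  simp only [dict_contrib, PySem.Dict.getD_empty, zero_add, rle_contrib_one, PySem.List.count]

-- ===== VERDICT (by name: the statement is the Claim_ definition above) =====
theorem HeuristicValue_spec : Claim_equal_HeuristicValue := by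
  intro list id _ hpre
  unfold Spec_HeuristicValue
  by_cases h5 : (5 : Int) ∈ list
  · simp only [HeuristicValue, HeuristicValue_alt, if_pos h5]
  · by_cases hg : (id = 0 ∧ (3 : Int) ∈ list) ∨ (id = 1 ∧ (1 : Int) ∈ list)
    · simp only [HeuristicValue, HeuristicValue_alt, if_neg h5, if_pos hg]
    · have hlen : 5 ≤ list.length := by
        rcases hpre with h | h | h | h
        · exact absurd h h5
        · exact absurd (Or.inl h) hg
        · exact absurd (Or.inr h) hg
        · exact h
      match list, hlen with
      | a :: b :: c :: d :: e :: t, _ =>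
        exact HeuristicValue_core a b c d e t id h5 hg
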